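-- pv_equiv track=rewrite | github.com/carevealed/PBCore | PBCore/scripts/pbcore_csv.py | sep_pres_access
-- ===== SOURCE A (Python) =====
-- def sep_pres_access(digital_files):
--     preservation = []
--     access = []
--     # part = []
--     for file in digital_files:
--         if "_prsv" in file and ".md5" not in file:
--             preservation.append(file)
--
--         elif "_access" in file and ".md5" not in file:
--             access.append(file)
--
--     return sorted(preservation), sorted(access)
-- ===== SOURCE B (Python) =====
-- def _insort(x, ys):
--     # insert x into the already-sorted list ys, keeping it sorted (after all elements <= x)
--     i = 0
--     while i < len(ys) and ys[i] <= x: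
--         i += 1
--     return ys[:i] + [x] + ys[i:]
--
--
-- def sep_pres_access(digital_files):
--     # insertion-sort partition: keep both result lists sorted at all times, never call sorted()
--     preservation = []
--     access = []
--     for file in digital_files:
--         if ".md5" in file:
--             continue
--         if "_prsv" in file:
--             preservation = _insort(file, preservation)
--         elif "_access" in file:
--             access = _insort(file, access)
--     return preservation, access
-- ===== Notes on version B (the rewrite author's own statement) =====
-- stated objective: alternative
-- what changed: B replaces partition-then-sort by a structural recursion over the list that maintains both result lists sorted at all times via hand-written insertion (insertion sort), never calling sorted().
import Mathlib
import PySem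

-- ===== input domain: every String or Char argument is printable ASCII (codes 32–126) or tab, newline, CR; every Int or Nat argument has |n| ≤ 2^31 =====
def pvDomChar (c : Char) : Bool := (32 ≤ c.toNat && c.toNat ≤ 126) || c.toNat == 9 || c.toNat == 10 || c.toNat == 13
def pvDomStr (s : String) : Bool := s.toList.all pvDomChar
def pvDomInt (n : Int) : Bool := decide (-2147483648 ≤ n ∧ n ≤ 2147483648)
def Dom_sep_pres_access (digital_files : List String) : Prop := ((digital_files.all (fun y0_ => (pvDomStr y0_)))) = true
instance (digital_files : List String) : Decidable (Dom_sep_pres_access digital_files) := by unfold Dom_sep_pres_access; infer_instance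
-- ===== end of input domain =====

-- B never calls sorted(): it maintains both result lists sorted at all times, inserting each
-- selected file by a hand-written sorted insertion (insertion sort); objective: alternative.

-- ===== PORT A =====
def sep_pres_access (digital_files : List String) : List String × List String :=
  let st := digital_files.foldl (fun (acc : List String × List String) file =>
    if PySem.Str.isIn "_prsv" file && !(PySem.Str.isIn ".md5" file) then
      (acc.1 ++ [file], acc.2)
    else if PySem.Str.isIn "_access" file && !(PySem.Str.isIn ".md5" file) then
      (acc.1, acc.2 ++ [file])
    else acc) ([], [])
  (PySem.List.sorted st.1 (fun x => x) false, PySem.List.sorted st.2 (fun x => x) false)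

-- ===== PORT B =====
-- _insort: the while-loop scans past every ys[i] <= x and splices x in; transliterated as the
-- equivalent structural recursion producing the same list (exact: h ≤ x ↔ the loop keeps going).
def pvInsort (x : String) : List String → List String
  | [] => [x]
  | h :: t => if h ≤ x then h :: pvInsort x t else x :: h :: t

def sep_pres_access_alt (digital_files : List String) : List String × List String :=
  digital_files.foldl (fun (acc : List String × List String) file =>
    if PySem.Str.isIn ".md5" file then acc
    else if PySem.Str.isIn "_prsv" file then (pvInsort file acc.1, acc.2)
    else if PySem.Str.isIn "_access" file then (acc.1, pvInsort file acc.2)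
    else acc) ([], [])

-- ===== PRECONDITION & SPEC =====
def Spec_sep_pres_access (digital_files : List String) (out : List String × List String) : Prop := out = sep_pres_access_alt digital_files
instance (digital_files : List String) (out : List String × List String) : Decidable (Spec_sep_pres_access digital_files out) := by unfold Spec_sep_pres_access; infer_instance

-- ===== CLAIM =====
def Claim_equal_sep_pres_access : Prop := ∀ (digital_files : List String), Dom_sep_pres_access digital_files → Spec_sep_pres_access digital_files (sep_pres_access digital_files)

-- ===== LEMMAS AND PROOFS =====

-- the two selection predicates, as functions of the input string only
def pvP (f : String) : Bool := PySem.Str.isIn "_prsv" f && !(PySem.Str.isIn ".md5" f)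
def pvQ (f : String) : Bool := !(PySem.Str.isIn "_prsv" f) && PySem.Str.isIn "_access" f && !(PySem.Str.isIn ".md5" f)

-- repeated sorted insertion of a whole list
def pvInsAll (ys : List String) (acc : List String) : List String :=
  ys.foldl (fun acc x => pvInsort x acc) acc

-- A's loop computes the two filters (appended to the accumulator)
theorem foldA_eq (xs : List String) (a b : List String) :
    xs.foldl (fun (acc : List String × List String) file =>
      if PySem.Str.isIn "_prsv" file && !(PySem.Str.isIn ".md5" file) then
        (acc.1 ++ [file], acc.2)
      else if PySem.Str.isIn "_access" file && !(PySem.Str.isIn ".md5" file) then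
        (acc.1, acc.2 ++ [file])
      else acc) (a, b) = (a ++ xs.filter pvP, b ++ xs.filter pvQ) := by
  induction xs generalizing a b with
  | nil => simp
  | cons x xs ih =>
    simp only [List.foldl_cons, List.filter_cons]
    cases h1 : PySem.Str.isIn "_prsv" x <;>
      cases h2 : PySem.Str.isIn ".md5" x <;>
      cases h3 : PySem.Str.isIn "_access" x <;>
      simp at h1 h2 h3 ih <;>
        simp [h1, h2, h3, pvP, pvQ, ih]

-- B's loop inserts the same two filtered sublists into the accumulator
theorem foldB_eq (xs : List String) (a b : List String) :
    xs.foldl (fun (acc : List String × List String) file =>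
      if PySem.Str.isIn ".md5" file then acc
      else if PySem.Str.isIn "_prsv" file then (pvInsort file acc.1, acc.2)
      else if PySem.Str.isIn "_access" file then (acc.1, pvInsort file acc.2)
      else acc) (a, b) = (pvInsAll (xs.filter pvP) a, pvInsAll (xs.filter pvQ) b) := by
  induction xs generalizing a b with
  | nil => simp [pvInsAll]
  | cons x xs ih =>
    simp only [List.foldl_cons, List.filter_cons]
    cases h1 : PySem.Str.isIn "_prsv" x <;>
      cases h2 : PySem.Str.isIn ".md5" x <;>
      cases h3 : PySem.Str.isIn "_access" x <;>
      simp at h1 h2 h3 ih <;>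
        simp [h1, h2, h3, pvP, pvQ, ih, pvInsAll]

theorem perm_insort (x : String) (l : List String) : (pvInsort x l).Perm (x :: l) := by
  induction l with
  | nil => simp [pvInsort]
  | cons h t ih =>
    simp only [pvInsort]
    split_ifs with hle
    · exact (ih.cons h).trans (List.Perm.swap x h t)
    · exact List.Perm.refl _

theorem mem_insort {y x : String} {l : List String} :
    y ∈ pvInsort x l ↔ y = x ∨ y ∈ l := by
  rw [(perm_insort x l).mem_iff]; simp

theorem pairwise_insort (x : String) {l : List String}
    (hl : l.Pairwise (· ≤ ·)) : (pvInsort x l).Pairwise (· ≤ ·) := by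
  induction l with
  | nil => simp [pvInsort]
  | cons h t ih =>
    rcases List.pairwise_cons.mp hl with ⟨hh, ht⟩
    simp only [pvInsort]
    split_ifs with hle
    · refine List.pairwise_cons.mpr ⟨?_, ih ht⟩
      intro y hy
      rcases mem_insort.mp hy with rfl | hy
      · exact hle
      · exact hh y hy
    · refine List.pairwise_cons.mpr ⟨?_, hl⟩
      intro y hy
      rcases List.mem_cons.mp hy with rfl | hy
      · exact le_of_not_ge fun h' => hle h'
      · exact le_trans (le_of_not_ge fun h' => hle h') (hh y hy)

theorem perm_insAll (ys : List String) (acc : List String) :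
    (pvInsAll ys acc).Perm (acc ++ ys) := by
  induction ys generalizing acc with
  | nil => simp [pvInsAll]
  | cons y ys ih =>
    simp only [pvInsAll, List.foldl_cons]
    have h1 : (pvInsAll ys (pvInsort y acc)).Perm (pvInsort y acc ++ ys) := ih _
    have h2 : (pvInsort y acc ++ ys).Perm ((y :: acc) ++ ys) :=
      (perm_insort y acc).append_right ys
    exact (h1.trans h2).trans (by simpa using List.perm_middle.symm)

theorem pairwise_insAll (ys : List String) {acc : List String}
    (hacc : acc.Pairwise (· ≤ ·)) : (pvInsAll ys acc).Pairwise (· ≤ ·) := by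
  induction ys generalizing acc with
  | nil => simp only [pvInsAll, List.foldl_nil]; exact hacc
  | cons y ys ih =>
    simp only [pvInsAll, List.foldl_cons]
    exact ih (pairwise_insort y hacc)

theorem insAll_eq_sorted (ys : List String) :
    pvInsAll ys [] = PySem.List.sorted ys (fun x => x) false := by
  have h1 : (pvInsAll ys []).Perm ys := by simpa using perm_insAll ys []
  have h2 : (pvInsAll ys []).Pairwise (· ≤ ·) := pairwise_insAll ys List.Pairwise.nil
  exact Eq.symm (PySem.List.sorted_id_eq_of_perm_of_pairwise ys (pvInsAll ys []) h1 h2)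

-- ===== VERDICT =====
theorem sep_pres_access_spec : Claim_equal_sep_pres_access := by
  intro xs _
  unfold Spec_sep_pres_access sep_pres_access sep_pres_access_alt
  rw [foldA_eq, foldB_eq]
  simp [insAll_eq_sorted]
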